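-- pv_equiv track=rewrite | github.com/Ctrl-cv-engineer/Selena | DialogueSystem/config/resources.py | _skill_matches_name
-- ===== SOURCE A (Python) =====
-- def _skill_matches_name(skill: dict, skill_name: str):
--     normalized = str(skill_name or "").strip().lower().replace("_", "-")
--     if not normalized:
--         return False
--     candidates = set()
--     for key in ("name", "skill_name", "folder_name"):
--         value = str(skill.get(key) or "").strip().lower()
--         if value:
--             candidates.add(value)
--             candidates.add(value.replace("_", "-"))
--             candidates.add(value.replace("-", "_"))
--     return normalized in candidates
-- ===== SOURCE B (Python) =====
-- def _skill_matches_name(skill: dict, skill_name: str):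
--     def canon(s):
--         return str(s or "").strip().lower().replace("_", "-")
--     target = canon(skill_name)
--     if not target:
--         return False
--     return any(canon(skill.get(key)) == target
--                for key in ("name", "skill_name", "folder_name"))
-- ===== Notes on version B (the rewrite author's own statement) =====
-- stated objective: simpler
-- what changed: B drops A's candidate-set construction (three variants per field accumulated into a set, then membership) and instead canonicalizes each of the three fields once with the same strip/lower/replace('_','-') and compares it directly to the canonical target with an early-exit any(); this works because the target contains no underscore, so membership in A's three-variant set reduces to equality of canonical forms.
import Mathlib
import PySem

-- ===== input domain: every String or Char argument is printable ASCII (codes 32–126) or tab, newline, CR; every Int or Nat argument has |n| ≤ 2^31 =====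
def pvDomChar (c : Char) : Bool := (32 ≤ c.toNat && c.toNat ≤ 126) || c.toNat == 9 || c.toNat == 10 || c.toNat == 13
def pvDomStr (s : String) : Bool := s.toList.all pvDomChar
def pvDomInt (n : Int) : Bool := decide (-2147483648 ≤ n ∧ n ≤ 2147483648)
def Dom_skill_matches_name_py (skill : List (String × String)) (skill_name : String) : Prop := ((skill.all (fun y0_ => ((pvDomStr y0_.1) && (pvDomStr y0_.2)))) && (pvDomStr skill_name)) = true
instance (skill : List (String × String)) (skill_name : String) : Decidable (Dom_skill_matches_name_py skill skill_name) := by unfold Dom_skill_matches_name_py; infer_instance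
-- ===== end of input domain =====

-- B replaces A's three-variant candidate set + membership test by direct comparison of the
-- canonical ('_'→'-') forms of the three fields with the canonical target (simpler: no set).


-- ===== PORT A =====
def skill_matches_name_py (skill : List (String × String)) (skill_name : String) : Bool :=
  let normalized := PySem.Str.replace (PySem.Str.lower (PySem.Str.strip skill_name)) "_" "-"
  if normalized = "" then false
  else
    let candidates : PySem.Set String :=
      ["name", "skill_name", "folder_name"].foldl (fun candidates key =>
        let value := PySem.Str.lower (PySem.Str.strip (((PySem.Dict.mk skill).get? key).getD ""))
        if value ≠ "" then
          PySem.Set.add (PySem.Set.add (PySem.Set.add candidates value)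
            (PySem.Str.replace value "_" "-")) (PySem.Str.replace value "-" "_")
        else candidates) PySem.Set.empty
    PySem.Set.contains candidates normalized

-- ===== PORT B =====
-- helper of B: canon(s) = str(s or "").strip().lower().replace("_", "-")
def pvCanon (s : String) : String :=
  PySem.Str.replace (PySem.Str.lower (PySem.Str.strip s)) "_" "-"

def skill_matches_name_py_alt (skill : List (String × String)) (skill_name : String) : Bool :=
  let target := pvCanon skill_name
  if target = "" then false
  else ["name", "skill_name", "folder_name"].any (fun key =>
    pvCanon (((PySem.Dict.mk skill).get? key).getD "") == target)

-- ===== PRECONDITION & SPEC =====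
def Spec_skill_matches_name_py (skill : List (String × String)) (skill_name : String) (out : Bool) : Prop := out = skill_matches_name_py_alt skill skill_name
instance (skill : List (String × String)) (skill_name : String) (out : Bool) : Decidable (Spec_skill_matches_name_py skill skill_name out) := by unfold Spec_skill_matches_name_py; infer_instance

-- ===== CLAIM (what is proved, stated in full; the proofs are below) =====
def Claim_equal_skill_matches_name_py : Prop := ∀ (skill : List (String × String)) (skill_name : String), Dom_skill_matches_name_py skill skill_name → Spec_skill_matches_name_py skill skill_name (skill_matches_name_py skill skill_name)

-- ===== LEMMAS AND PROOFS =====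

-- single-char replace is a map
theorem pv_go_single (a b : Char) : ∀ (fuel : Nat) (l acc : List Char), l.length ≤ fuel →
    PySem.Chars.replace.go [a] [b] fuel l acc
      = acc.reverse ++ l.map (fun c => if c == a then b else c) := by
  intro fuel
  induction fuel with
  | zero =>
    intro l acc h
    have : l = [] := List.eq_nil_of_length_eq_zero (Nat.le_zero.mp h)
    subst this
    simp [PySem.Chars.replace.go]
  | succ n ih =>
    intro l acc h
    cases l with
    | nil => simp [PySem.Chars.replace.go]
    | cons c t =>
      by_cases hc : c = a
      · subst hc
        have : List.isPrefixOf [c] (c :: t) = true := by simp [List.isPrefixOf]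
        rw [PySem.Chars.replace.go, if_pos this]
        simp only [List.length_cons, List.length_nil, Nat.zero_add, List.drop_succ_cons,
          List.drop_zero]
        simp only [List.length_cons] at h
        rw [ih _ _ (by omega)]
        simp
      · have : List.isPrefixOf [a] (c :: t) = false := by
          simp [List.isPrefixOf]
          exact fun hh => (hc hh.symm).elim
        rw [PySem.Chars.replace.go, if_neg (by simp [this])]
        simp only [List.length_cons] at h
        rw [ih _ _ (by omega)]
        simp [hc]

theorem pv_replace_single (s : List Char) (a b : Char) :
    PySem.Chars.replace s [a] [b] = s.map (fun c => if c == a then b else c) := by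
  rw [PySem.Chars.replace]
  simp only [List.isEmpty_cons, Bool.false_eq_true, if_false]
  simpa using pv_go_single a b s.length s [] (le_refl _)

theorem pv_no_underscore (s : List Char) : '_' ∉ PySem.Chars.replace s ['_'] ['-'] := by
  rw [pv_replace_single]
  intro h
  rcases List.mem_map.mp h with ⟨c, _, hc⟩
  by_cases h1 : c = '_' <;> simp [h1] at hc

-- membership in A's variant set reduces to equality of canonical forms
theorem pv_variants (n v : List Char) (h : '_' ∉ n) :
    (n = v ∨ n = PySem.Chars.replace v ['_'] ['-'] ∨ n = PySem.Chars.replace v ['-'] ['_'])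
      ↔ PySem.Chars.replace v ['_'] ['-'] = n := by
  constructor
  · rintro (rfl | rfl | heq)
    · rw [pv_replace_single]
      refine (List.map_congr_left ?_).trans (List.map_id _)
      intro c hc
      have : c ≠ '_' := fun hch => h (hch ▸ hc)
      simp [this]
    · rfl
    · -- n = v with '-'→'_'; since '_' ∉ n, v has no '-' and no '_'
      have hv : ∀ c ∈ v, c ≠ '-' ∧ c ≠ '_' := by
        intro c hc
        have hmem : (if c == '-' then '_' else c) ∈ n := by
          rw [heq, pv_replace_single]
          exact List.mem_map.mpr ⟨c, hc, rfl⟩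
        by_cases h1 : c = '-'
        · simp [h1] at hmem; exact absurd hmem h
        · constructor
          · exact h1
          · intro h2; subst h2; simp at hmem; exact h hmem
      have hid : ∀ (x : Char), PySem.Chars.replace v [x] ['_'] = v ∨ True := fun _ => Or.inr trivial
      have e1 : PySem.Chars.replace v ['-'] ['_'] = v := by
        rw [pv_replace_single]
        refine (List.map_congr_left ?_).trans (List.map_id _)
        intro c hc; simp [(hv c hc).1]
      have e2 : PySem.Chars.replace v ['_'] ['-'] = v := by
        rw [pv_replace_single]
        refine (List.map_congr_left ?_).trans (List.map_id _)
        intro c hc; simp [(hv c hc).2]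
      rw [e2, ← e1, ← heq]
  · intro heq
    exact Or.inr (Or.inl heq.symm)

-- string-level version
theorem pv_variants_str (n v : String) (h : '_' ∉ n.toList) :
    (n = v ∨ n = PySem.Str.replace v "_" "-" ∨ n = PySem.Str.replace v "-" "_")
      ↔ PySem.Str.replace v "_" "-" = n := by
  have inj : ∀ (x y : String), x = y ↔ x.toList = y.toList := by
    intro x y
    constructor
    · intro h; rw [h]
    · intro h; exact String.ext (by simpa [String.toList] using h)
  rw [inj n v, inj n (PySem.Str.replace v "_" "-"), inj n (PySem.Str.replace v "-" "_"),
      inj (PySem.Str.replace v "_" "-") n]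
  simpa using pv_variants n.toList v.toList h

-- A's loop body, named (definitionally equal to the lambda in the port)
def pvBody (skill : List (String × String)) (candidates : PySem.Set String) (key : String) : PySem.Set String :=
  let value := PySem.Str.lower (PySem.Str.strip (((PySem.Dict.mk skill).get? key).getD ""))
  if value ≠ "" then
    PySem.Set.add (PySem.Set.add (PySem.Set.add candidates value)
      (PySem.Str.replace value "_" "-")) (PySem.Str.replace value "-" "_")
  else candidates

-- one step of A's loop, as seen through membership of the normalized name
theorem pv_step (raw n : String)
    (hn : n ≠ "") (h : '_' ∉ n.toList) (s : PySem.Set String) :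
    (n ∈ (let value := PySem.Str.lower (PySem.Str.strip raw)
          if value ≠ "" then
            PySem.Set.add (PySem.Set.add (PySem.Set.add s value)
              (PySem.Str.replace value "_" "-")) (PySem.Str.replace value "-" "_")
          else s))
      ↔ (n ∈ s ∨ pvCanon raw = n) := by
  have hcanon : pvCanon raw = PySem.Str.replace (PySem.Str.lower (PySem.Str.strip raw)) "_" "-" := rfl
  rw [hcanon]
  simp only
  generalize PySem.Str.lower (PySem.Str.strip raw) = v
  by_cases hve : v ≠ ""
  · rw [if_pos hve]
    simp only [PySem.Set.mem_add]
    constructor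
    · rintro (((hs | h1) | h2) | h3)
      · exact Or.inl hs
      · exact Or.inr ((pv_variants_str n v h).mp (Or.inl h1))
      · exact Or.inr ((pv_variants_str n v h).mp (Or.inr (Or.inl h2)))
      · exact Or.inr ((pv_variants_str n v h).mp (Or.inr (Or.inr h3)))
    · rintro (hs | heq)
      · exact Or.inl (Or.inl (Or.inl hs))
      · exact Or.inl (Or.inr heq.symm)
  · rw [if_neg hve]
    rw [not_not] at hve
    subst hve
    have he : PySem.Str.replace "" "_" "-" = "" := by decide
    rw [he]
    constructor
    · exact Or.inl
    · rintro (hs | heq)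
      · exact hs
      · exact absurd heq.symm hn

theorem pv_step_body (skill : List (String × String)) (k n : String)
    (hn : n ≠ "") (h : '_' ∉ n.toList) (s : PySem.Set String) :
    (n ∈ pvBody skill s k) ↔ (n ∈ s ∨ pvCanon (((PySem.Dict.mk skill).get? k).getD "") = n) :=
  pv_step (((PySem.Dict.mk skill).get? k).getD "") n hn h s

-- the whole loop: membership in the accumulated set = any of the canonical comparisons
theorem pv_fold (skill : List (String × String)) (n : String)
    (hn : n ≠ "") (h : '_' ∉ n.toList) :
    ∀ (keys : List String) (s : PySem.Set String),
    (n ∈ keys.foldl (pvBody skill) s)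
      ↔ (n ∈ s ∨ keys.any (fun key => pvCanon (((PySem.Dict.mk skill).get? key).getD "") == n) = true) := by
  intro keys
  induction keys with
  | nil => intro s; simp
  | cons k ks ih =>
    intro s
    rw [List.foldl_cons, ih, pv_step_body skill k n hn h s]
    simp only [List.any_cons, Bool.or_eq_true, beq_iff_eq]
    rw [or_assoc]

-- ===== VERDICT (by name: the statement is the Claim_ definition above) =====
theorem skill_matches_name_py_spec : Claim_equal_skill_matches_name_py := by
  intro skill skill_name _
  show skill_matches_name_py skill skill_name = skill_matches_name_py_alt skill skill_name
  have hA : skill_matches_name_py skill skill_name =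
      (if pvCanon skill_name = "" then false
       else PySem.Set.contains
         (List.foldl (pvBody skill) PySem.Set.empty ["name", "skill_name", "folder_name"])
         (pvCanon skill_name)) := rfl
  have hB : skill_matches_name_py_alt skill skill_name =
      (if pvCanon skill_name = "" then false
       else ["name", "skill_name", "folder_name"].any (fun key =>
         pvCanon (((PySem.Dict.mk skill).get? key).getD "") == pvCanon skill_name)) := rfl
  rw [hA, hB]
  by_cases he : pvCanon skill_name = ""
  · rw [if_pos he, if_pos he]
  · rw [if_neg he, if_neg he]
    have hund : '_' ∉ (pvCanon skill_name).toList := by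
      rw [pvCanon, PySem.Str.toList_replace]
      exact pv_no_underscore _
    have hf := pv_fold skill (pvCanon skill_name) he hund
      ["name", "skill_name", "folder_name"] PySem.Set.empty
    rw [Bool.eq_iff_iff, PySem.Set.contains_iff, hf]
    simp [PySem.Set.empty]
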